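-- pv_equiv track=rewrite | github.com/buske/patient-similarity | patient_similarity/hpo.py | _iter_hp_terms
-- ===== SOURCE A (Python) =====
-- def _iter_hp_terms(reader):
--     term_lines = None
--     for line in reader:
--         line = line.strip()
--         if not line: continue
--         if line == '[Term]':
--             if term_lines:
--                 yield term_lines
--
--             term_lines = []
--         else:
--             if term_lines is not None:
--                 term_lines.append(line)
--
--     if term_lines:
--         yield term_lines
-- ===== SOURCE B (Python) =====
-- def _iter_hp_terms(reader):
--     lines = [s for s in (ln.strip() for ln in reader) if s]
--     bounds = [i for i, s in enumerate(lines) if s == '[Term]'] + [len(lines)]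
--     for a, b in zip(bounds, bounds[1:]):
--         block = lines[a + 1:b]
--         if block:
--             yield block
-- ===== Notes on version B (the rewrite author's own statement) =====
-- stated objective: alternative
-- what changed: Replaces the stateful one-pass accumulator (Optional current-block list mutated while streaming) with a three-stage pipeline: materialize the stripped non-empty lines, compute the '[Term]' marker indices plus a length sentinel, and emit the non-empty slices between consecutive markers.
import Mathlib
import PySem

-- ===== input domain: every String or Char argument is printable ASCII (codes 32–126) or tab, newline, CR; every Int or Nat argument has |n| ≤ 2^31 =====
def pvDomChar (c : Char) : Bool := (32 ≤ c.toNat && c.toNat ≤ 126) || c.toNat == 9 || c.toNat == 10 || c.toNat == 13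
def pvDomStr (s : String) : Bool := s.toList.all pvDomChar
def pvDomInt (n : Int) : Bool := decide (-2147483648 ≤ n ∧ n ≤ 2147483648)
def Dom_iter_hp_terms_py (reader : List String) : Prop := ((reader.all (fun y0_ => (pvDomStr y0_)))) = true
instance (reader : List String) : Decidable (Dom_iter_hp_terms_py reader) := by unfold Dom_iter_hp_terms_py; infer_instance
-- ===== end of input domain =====

-- B replaces A's streaming Optional-accumulator state machine by a three-stage pipeline
-- (clean lines, '[Term]' marker indices + sentinel, slices between consecutive markers);
-- objective: alternative decomposition, same O(n) cost. (A is a generator; compared as the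
-- list of yielded blocks.)

-- ===== PORT A =====
-- the loop body of A: state = (term_lines : Option (List String), yielded blocks so far)
def pvStepA (st : Option (List String) × List (List String)) (line : String) :
    Option (List String) × List (List String) :=
  let line := PySem.Str.strip line
  if line = "" then st
  else if line = "[Term]" then
    match st.1 with
    | some cur => (some [], if cur ≠ [] then st.2 ++ [cur] else st.2)
    | none => (some [], st.2)
  else
    match st.1 with
    | some cur => (some (cur ++ [line]), st.2)
    | none => (none, st.2)

-- the trailing 'if term_lines: yield term_lines'
def pvFinishA (st : Option (List String) × List (List String)) : List (List String) :=
  match st.1 with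
  | some cur => if cur ≠ [] then st.2 ++ [cur] else st.2
  | none => st.2

def iter_hp_terms_py (reader : List String) : List (List String) :=
  pvFinishA (reader.foldl pvStepA (none, []))

-- ===== PORT B =====
def iter_hp_terms_py_alt (reader : List String) : List (List String) :=
  let lines := (reader.map (fun ln => PySem.Str.strip ln)).filter (fun s => s ≠ "")
  let bounds := ((PySem.List.enumerate lines 0).filter (fun p => p.2 = "[Term]")).map (·.1)
      ++ [(lines.length : Int)]
  (bounds.zip bounds.tail).foldl
    (fun acc p =>
      if PySem.List.slice lines (some (p.1 + 1)) (some p.2) ≠ [] then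
        acc ++ [PySem.List.slice lines (some (p.1 + 1)) (some p.2)]
      else acc) []

-- ===== PRECONDITION & SPEC =====
def Spec_iter_hp_terms_py (reader : List String) (out : List (List String)) : Prop := out = iter_hp_terms_py_alt reader
instance (reader : List String) (out : List (List String)) : Decidable (Spec_iter_hp_terms_py reader out) := by unfold Spec_iter_hp_terms_py; infer_instance

-- ===== CLAIM (what is proved, stated in full; the proofs are below) =====
def Claim_equal_iter_hp_terms_py : Prop := ∀ (reader : List String), Dom_iter_hp_terms_py reader → Spec_iter_hp_terms_py reader (iter_hp_terms_py reader)

-- ===== LEMMAS AND PROOFS =====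

-- cleaned input: stripped, non-empty lines
def pvClean (reader : List String) : List String :=
  (reader.map (fun ln => PySem.Str.strip ln)).filter (fun s => s ≠ "")

-- A's loop body on an already-cleaned line (no strip, no empty check)
def pvStepC (st : Option (List String) × List (List String)) (line : String) :
    Option (List String) × List (List String) :=
  if line = "[Term]" then
    match st.1 with
    | some cur => (some [], if cur ≠ [] then st.2 ++ [cur] else st.2)
    | none => (some [], st.2)
  else
    match st.1 with
    | some cur => (some (cur ++ [line]), st.2)
    | none => (none, st.2)

-- reference recursion both sides are reduced to
mutual
def pvR1 : List String → List (List String)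
  | [] => []
  | x :: xs => if x = "[Term]" then pvR2 [] xs else pvR1 xs
def pvR2 : List String → List String → List (List String)
  | cur, [] => if cur = [] then [] else [cur]
  | cur, x :: xs =>
    if x = "[Term]" then (if cur = [] then [] else [cur]) ++ pvR2 [] xs
    else pvR2 (cur ++ [x]) xs
end

-- Nat-level mirror of B's pipeline
def pvMarks : List String → List Nat
  | [] => []
  | x :: xs => if x = "[Term]" then 0 :: (pvMarks xs).map (· + 1) else (pvMarks xs).map (· + 1)

def pvBounds (lines : List String) : List Nat := pvMarks lines ++ [lines.length]

def pvStepN (lines : List String) (acc : List (List String)) (p : Nat × Nat) : List (List String) :=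
  if (lines.drop (p.1 + 1)).take (p.2 - (p.1 + 1)) ≠ [] then
    acc ++ [(lines.drop (p.1 + 1)).take (p.2 - (p.1 + 1))]
  else acc

def pvBN (lines : List String) : List (List String) :=
  (((pvBounds lines).zip (pvBounds lines).tail)).foldl (pvStepN lines) []

theorem pv_fold_clean (reader : List String) (st : Option (List String) × List (List String)) :
    reader.foldl pvStepA st = (pvClean reader).foldl pvStepC st := by
  induction reader generalizing st with
  | nil => rfl
  | cons x xs ih =>
    by_cases h : PySem.Str.strip x = ""
    · have hc : pvClean (x :: xs) = pvClean xs := by simp [pvClean, h]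
      rw [hc, List.foldl_cons, show pvStepA st x = st from by simp [pvStepA, h], ih]
    · have hc : pvClean (x :: xs) = PySem.Str.strip x :: pvClean xs := by simp [pvClean, h]
      rw [hc, List.foldl_cons, List.foldl_cons,
        show pvStepA st x = pvStepC st (PySem.Str.strip x) from by simp [pvStepA, pvStepC, h], ih]

theorem pv_foldC_some (lines : List String) (cur : List String)
    (acc : List (List String)) :
    pvFinishA (lines.foldl pvStepC (some cur, acc)) = acc ++ pvR2 cur lines := by
  induction lines generalizing cur acc with
  | nil =>
    by_cases h : cur = [] <;> simp [pvFinishA, pvR2, h]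
  | cons x xs ih =>
    by_cases h : x = "[Term]"
    · by_cases hc : cur = [] <;>
        simp [List.foldl_cons, pvStepC, h, hc, pvR2, ih]
    · simp [List.foldl_cons, pvStepC, h, pvR2, ih]

theorem pv_foldC_none (lines : List String) (acc : List (List String)) :
    pvFinishA (lines.foldl pvStepC (none, acc)) = acc ++ pvR1 lines := by
  induction lines generalizing acc with
  | nil => simp [pvFinishA, pvR1]
  | cons x xs ih =>
    by_cases h : x = "[Term]"
    · simp [List.foldl_cons, pvStepC, h, pvR1, pv_foldC_some]
    · simp [List.foldl_cons, pvStepC, h, pvR1, ih]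

theorem pv_A_eq_r1 (reader : List String) : iter_hp_terms_py reader = pvR1 (pvClean reader) := by
  rw [iter_hp_terms_py, pv_fold_clean]
  simpa using pv_foldC_none (pvClean reader) []

-- B's pipeline on the cleaned lines, with Python Int indices
def pvBInt (L : List String) : List (List String) :=
  let bounds := ((PySem.List.enumerate L 0).filter (fun p => p.2 = "[Term]")).map (·.1)
      ++ [(L.length : Int)]
  (bounds.zip bounds.tail).foldl
    (fun acc p =>
      if PySem.List.slice L (some (p.1 + 1)) (some p.2) ≠ [] then
        acc ++ [PySem.List.slice L (some (p.1 + 1)) (some p.2)]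
      else acc) []

theorem pv_marks_int (lines : List String) (s : Int) :
    ((PySem.List.enumerate lines s).filter (fun p => p.2 = "[Term]")).map (·.1)
      = (pvMarks lines).map (fun n : Nat => s + (n : Int)) := by
  induction lines generalizing s with
  | nil => simp [pvMarks]
  | cons x xs ih =>
    have hm : ((pvMarks xs).map (· + 1)).map (fun n : Nat => s + (n : Int))
        = (pvMarks xs).map (fun n : Nat => (s + 1) + (n : Int)) := by
      rw [List.map_map]
      exact List.map_congr_left (fun a _ => by simp; ring)
    by_cases h : x = "[Term]" <;>
      simp [PySem.List.enumerate_cons, h, pvMarks, ih (s + 1), hm]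

theorem pv_bint_eq_BN (L : List String) : pvBInt L = pvBN L := by
  rw [pvBInt, pvBN]
  have hb : ((PySem.List.enumerate L 0).filter (fun p => p.2 = "[Term]")).map (·.1)
      ++ [(L.length : Int)] = (pvBounds L).map (fun n : Nat => (n : Int)) := by
    rw [pv_marks_int]; simp [pvBounds]
  simp only [hb]
  rw [show ((pvBounds L).map (fun n : Nat => (n : Int))).tail
        = (pvBounds L).tail.map (fun n : Nat => (n : Int)) from (List.map_tail ..).symm,
      List.zip_map, List.foldl_map]
  have hstep : (fun (acc : List (List String)) (p : Nat × Nat) =>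
      if PySem.List.slice L (some ((Prod.map (fun n : Nat => (n : Int)) (fun n : Nat => (n : Int)) p).1 + 1))
          (some (Prod.map (fun n : Nat => (n : Int)) (fun n : Nat => (n : Int)) p).2) ≠ [] then
        acc ++ [PySem.List.slice L (some ((Prod.map (fun n : Nat => (n : Int)) (fun n : Nat => (n : Int)) p).1 + 1))
          (some (Prod.map (fun n : Nat => (n : Int)) (fun n : Nat => (n : Int)) p).2)]
      else acc) = pvStepN L := by
    funext acc p
    obtain ⟨a, b⟩ := p
    have hs : PySem.List.slice L (some ((a : Int) + 1)) (some (b : Int))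
        = (L.drop (a + 1)).take (b - (a + 1)) := by
      rw [show ((a : Int) + 1) = ((a + 1 : Nat) : Int) from by push_cast; ring]
      exact PySem.List.slice_natCast ..
    simp [Prod.map, hs, pvStepN]
  rw [hstep]

theorem pv_alt_eq_BN (reader : List String) :
    iter_hp_terms_py_alt reader = pvBN (pvClean reader) :=
  pv_bint_eq_BN (pvClean reader)

theorem pv_bounds_cons (x : String) (xs : List String) :
    pvBounds (x :: xs)
      = if x = "[Term]" then 0 :: (pvBounds xs).map (· + 1) else (pvBounds xs).map (· + 1) := by
  by_cases h : x = "[Term]" <;> simp [pvBounds, pvMarks, h]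

theorem pv_bounds_ne_nil (xs : List String) : pvBounds xs ≠ [] := by simp [pvBounds]

theorem pv_shift (xs : List String) (x : String) (ps : List (Nat × Nat))
    (acc : List (List String)) :
    (ps.map (Prod.map (· + 1) (· + 1))).foldl (pvStepN (x :: xs)) acc
      = ps.foldl (pvStepN xs) acc := by
  rw [List.foldl_map]
  have hstep : (fun (acc : List (List String)) (p : Nat × Nat) =>
      pvStepN (x :: xs) acc (Prod.map (· + 1) (· + 1) p)) = pvStepN xs := by
    funext acc p
    obtain ⟨a, b⟩ := p
    simp [pvStepN, Prod.map, List.drop_succ_cons, Nat.succ_sub_succ]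
  rw [hstep]

theorem pv_acc_out (lines : List String) (ps : List (Nat × Nat)) (acc : List (List String)) :
    ps.foldl (pvStepN lines) acc = acc ++ ps.foldl (pvStepN lines) [] := by
  induction ps generalizing acc with
  | nil => simp
  | cons p ps ih =>
    rw [List.foldl_cons, List.foldl_cons, ih, ih (pvStepN lines [] p)]
    simp only [pvStepN]
    split_ifs <;> simp

theorem pv_head_bound (xs : List String) :
    (pvBounds xs).head? = some (xs.takeWhile (fun s => s ≠ "[Term]")).length := by
  induction xs with
  | nil => simp [pvBounds, pvMarks]
  | cons x xs ih =>
    rw [pv_bounds_cons]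
    by_cases h : x = "[Term]"
    · simp [h]
    · simp [h, List.head?_map, ih]

theorem pv_take_head (p : String → Bool) (xs : List String) :
    xs.take (xs.takeWhile p).length = xs.takeWhile p := by
  induction xs with
  | nil => simp
  | cons x xs ih => cases hp : p x <;> simp [hp, ih]

theorem pv_r2_eq (xs : List String) (cur : List String) :
    pvR2 cur xs
      = (if cur ++ xs.takeWhile (fun s => s ≠ "[Term]") = [] then []
         else [cur ++ xs.takeWhile (fun s => s ≠ "[Term]")]) ++ pvR1 xs := by
  induction xs generalizing cur with
  | nil => by_cases h : cur = [] <;> simp [pvR2, pvR1, h]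
  | cons x xs ih =>
    by_cases h : x = "[Term]"
    · simp [pvR2, pvR1, h]
    · rw [show pvR2 cur (x :: xs) = pvR2 (cur ++ [x]) xs from by simp [pvR2, h], ih]
      simp [pvR1, h]

theorem pv_BN_eq_r1 (lines : List String) : pvBN lines = pvR1 lines := by
  induction lines with
  | nil => simp [pvBN, pvBounds, pvMarks, pvR1]
  | cons x xs ih =>
    rw [pvBN, pv_bounds_cons]
    by_cases h : x = "[Term]"
    · subst h
      rw [if_pos rfl]
      cases hB : pvBounds xs with
      | nil => exact absurd hB (pv_bounds_ne_nil xs)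
      | cons b0 rest =>
        have hb0 : b0 = (xs.takeWhile (fun s => s ≠ "[Term]")).length := by
          have hh := pv_head_bound xs
          rw [hB] at hh
          simpa using hh
        have hz2 : (((b0 :: rest).map (fun x : Nat => x + 1)).zip (rest.map (fun x : Nat => x + 1)))
            = ((b0 :: rest).zip rest).map (Prod.map (fun x => x + 1) (fun x => x + 1)) :=
          List.zip_map ..
        simp only [List.map_cons] at hz2
        simp only [List.map_cons, List.tail_cons, List.zip_cons_cons]
        rw [hz2, List.foldl_cons,
            show (b0 :: rest).zip rest = (pvBounds xs).zip (pvBounds xs).tail from by rw [hB, List.tail_cons],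
            pv_shift, pv_acc_out,
            show ((pvBounds xs).zip (pvBounds xs).tail).foldl (pvStepN xs) [] = pvR1 xs from ih]
        have ht : xs.take b0 = xs.takeWhile (fun s => s ≠ "[Term]") := by
          rw [hb0]; exact pv_take_head _ _
        have hfirst : pvStepN ("[Term]" :: xs) [] (0, b0 + 1)
            = if xs.takeWhile (fun s => s ≠ "[Term]") = [] then []
              else [xs.takeWhile (fun s => s ≠ "[Term]")] := by
          simp only [pvStepN, zero_add, Nat.add_sub_cancel, List.drop_succ_cons,
            List.drop_zero, ht]
          split_ifs with h1 h2 <;> simp_all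
        rw [hfirst, show pvR1 ("[Term]" :: xs) = pvR2 [] xs from by simp [pvR1], pv_r2_eq]
        simp
    · simp only [h, ite_false]
      rw [show ((pvBounds xs).map (· + 1)).tail = (pvBounds xs).tail.map (· + 1) from
            (List.map_tail ..).symm,
          List.zip_map, pv_shift, ← pvBN, ih]
      simp [pvR1, h]

-- ===== VERDICT (by name: the statement is the Claim_ definition above) =====
theorem iter_hp_terms_py_spec : Claim_equal_iter_hp_terms_py := by
  intro reader _
  show iter_hp_terms_py reader = iter_hp_terms_py_alt reader
  rw [pv_A_eq_r1, pv_alt_eq_BN, pv_BN_eq_r1]
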